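-- pv_equiv track=rewrite | github.com/LeandroASAlmeida/CursoUdemyPython | Secao08/ex33.py | soma_fatorial
-- ===== SOURCE A (Python) =====
-- def soma_fatorial(n):
--     fat =1
--     soma=0
--
--     for i in range(1, n+1):
--         fat *= i
--     fat = list(str(fat))
--
--     for i in range(len(fat)):
--         soma += int(fat[i])
--
--     return soma
-- ===== SOURCE B (Python) =====
-- def soma_fatorial(n):
--     fat = 1
--     for i in range(1, n + 1):
--         fat *= i
--     soma = 0
--     while fat > 0:
--         soma += fat % 10
--         fat //= 10
--     return soma
-- ===== Notes on version B (the rewrite author's own statement) =====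
-- stated objective: alternative
-- what changed: B keeps the factorial loop but sums digits arithmetically with a while-loop of % 10 and //= 10 instead of converting the factorial to a string, listing its characters and re-parsing each character with int().
import Mathlib
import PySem

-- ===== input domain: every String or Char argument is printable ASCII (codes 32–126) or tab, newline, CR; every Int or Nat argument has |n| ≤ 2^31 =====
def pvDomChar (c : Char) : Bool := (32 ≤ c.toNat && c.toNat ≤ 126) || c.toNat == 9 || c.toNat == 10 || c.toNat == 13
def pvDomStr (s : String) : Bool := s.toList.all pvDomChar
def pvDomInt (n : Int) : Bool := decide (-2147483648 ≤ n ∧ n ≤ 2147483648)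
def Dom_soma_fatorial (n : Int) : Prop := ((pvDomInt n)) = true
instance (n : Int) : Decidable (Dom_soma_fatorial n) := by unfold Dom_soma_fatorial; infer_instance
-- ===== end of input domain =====

-- B replaces A's string-based digit sum (list(str(fat)) + int() per character) by an
-- arithmetic while-loop extracting digits with % 10 and //= 10; alternative, not faster.


-- ===== PORT A =====
def soma_fatorial (n : Int) : Int :=
  let fat := (PySem.List.pyRange 1 (n + 1) 1).foldl (fun fat i => fat * i) 1
  let fatL := (PySem.Int.toStr fat).toList
  (PySem.List.pyRange 0 (fatL.length : Int) 1).foldl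
    (fun soma i => soma + (PySem.Int.ofChars? [PySem.List.pyGetD fatL i ' ']).getD 0) 0

-- ===== PORT B =====
-- the `while fat > 0:` loop of Source B (structural recursion on a fuel bound:
-- fat has at most fat.toNat + 1 decimal digits, and fat strictly shrinks via //= 10)
def pvDigitLoop : Nat → Int → Int → Int
  | 0, _, soma => soma
  | fuel + 1, fat, soma =>
    if 0 < fat then
      pvDigitLoop fuel (PySem.Int.floordiv fat 10) (soma + PySem.Int.mod fat 10)
    else soma

def soma_fatorial_alt (n : Int) : Int :=
  let fat := (PySem.List.pyRange 1 (n + 1) 1).foldl (fun fat i => fat * i) 1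
  pvDigitLoop (fat.toNat + 1) fat 0

-- ===== PRECONDITION & SPEC =====
def Spec_soma_fatorial (n : Int) (out : Int) : Prop := out = soma_fatorial_alt n
instance (n : Int) (out : Int) : Decidable (Spec_soma_fatorial n out) := by unfold Spec_soma_fatorial; infer_instance

-- ===== CLAIM (what is proved, stated in full; the proofs are below) =====
def Claim_equal_soma_fatorial : Prop := ∀ (n : Int), Dom_soma_fatorial n → Spec_soma_fatorial n (soma_fatorial n)

-- ===== LEMMAS AND PROOFS =====

-- arithmetic decimal digit sum of a natural number (proof-side reference function)
def pvS (m : Nat) : Int :=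
  if m < 10 then (m : Int) else pvS (m / 10) + ((m % 10 : Nat) : Int)
termination_by m
decreasing_by omega

theorem pvCharVal (d : Nat) (hd : d < 10) :
    (PySem.Int.ofChars? [Nat.digitChar d]).getD 0 = (d : Int) := by
  interval_cases d <;> decide

theorem pvFoldlAdd (g : Char → Int) :
    ∀ (l : List Char) (s : Int), l.foldl (fun a c => a + g c) s = s + (l.map g).sum := by
  intro l
  induction l with
  | nil => simp
  | cons c t ih => intro s; simp [List.foldl_cons, ih]; ring

theorem pvS_small (m : Nat) (h : m < 10) : pvS m = (m : Int) := by
  rw [pvS, if_pos h]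

theorem pvS_large (m : Nat) (h : 10 ≤ m) : pvS m = pvS (m / 10) + ((m % 10 : Nat) : Int) := by
  rw [pvS, if_neg (by omega)]

theorem pvCoreSum :
    ∀ (fuel m : Nat) (ds : List Char), m < fuel →
      ((Nat.toDigitsCore 10 fuel m ds).map (fun c => (PySem.Int.ofChars? [c]).getD 0)).sum
        = pvS m + ((ds.map (fun c => (PySem.Int.ofChars? [c]).getD 0)).sum) := by
  intro fuel
  induction fuel with
  | zero => intro m ds h; omega
  | succ fuel ih =>
    intro m ds h
    simp only [Nat.toDigitsCore]
    by_cases h0 : m / 10 = 0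
    · simp only [h0, reduceIte, List.map_cons, List.sum_cons]
      have hm : m < 10 := by omega
      rw [pvCharVal _ (Nat.mod_lt _ (by norm_num)), pvS_small m hm, Nat.mod_eq_of_lt hm]
    · have hm0 : 0 < m := Nat.pos_of_ne_zero (by intro e; exact h0 (by simp [e]))
      have h10 : 10 ≤ m := by
        by_contra hlt
        exact h0 (Nat.div_eq_of_lt (by omega))
      have hdm : m / 10 < m := Nat.div_lt_self hm0 (by norm_num)
      rw [if_neg h0, ih (m / 10) _ (by omega)]
      simp only [List.map_cons, List.sum_cons]
      rw [pvCharVal _ (Nat.mod_lt _ (by norm_num)), pvS_large m h10]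
      ring

theorem pvLoopSum : ∀ (fuel m : Nat) (s : Int), m < fuel → pvDigitLoop fuel (m : Int) s = s + pvS m := by
  intro fuel
  induction fuel with
  | zero => intro m s h; omega
  | succ fuel ih =>
    intro m s h
    rw [pvDigitLoop]
    by_cases hm : 0 < m
    · rw [if_pos (by exact_mod_cast hm)]
      have hdiv : PySem.Int.floordiv (m : Int) 10 = ((m / 10 : Nat) : Int) := by
        simp only [PySem.Int.floordiv, Int.fdiv_eq_ediv]; omega
      have hmod : PySem.Int.mod (m : Int) 10 = ((m % 10 : Nat) : Int) := by
        simp only [PySem.Int.mod, Int.fmod_eq_emod]; omega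
      have hdm : m / 10 < m := Nat.div_lt_self hm (by norm_num)
      rw [hdiv, hmod, ih (m / 10) _ (by omega)]
      by_cases h10 : m < 10
      · have h0 : m / 10 = 0 := Nat.div_eq_of_lt h10
        rw [pvS_small m h10, h0, pvS_small 0 (by norm_num), Nat.mod_eq_of_lt h10]
        push_cast
        ring
      · rw [pvS_large m (by omega)]
        ring
    · have : m = 0 := by omega
      subst this
      rw [if_neg (by norm_num), pvS_small 0 (by norm_num)]
      ring

theorem pvFoldlMulPos :
    ∀ (l : List Int), (∀ i ∈ l, 0 < i) → ∀ a : Int, 0 < a →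
      0 < l.foldl (fun x y => x * y) a := by
  intro l
  induction l with
  | nil => intro _ a ha; simpa using ha
  | cons x t ih =>
    intro h a ha
    simp only [List.foldl_cons]
    exact ih (fun i hi => h i (List.mem_cons_of_mem _ hi)) _
      (mul_pos ha (h x (List.mem_cons_self)))

-- the string-based digit sum of a nonnegative integer equals the arithmetic while-loop
theorem pvStrSumEqLoop (fat : Int) (hfat : 0 ≤ fat) :
    ((PySem.Int.toStr fat).toList.map (fun c => (PySem.Int.ofChars? [c]).getD 0)).sum
      = pvDigitLoop (fat.toNat + 1) fat 0 := by
  obtain ⟨m, rfl⟩ := Int.eq_ofNat_of_zero_le hfat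
  rw [PySem.Int.toList_toStr]
  have hnn : ¬ ((m : Int) < 0) := by exact_mod_cast Int.not_lt.mpr hfat
  simp only [PySem.Int.toChars, if_neg hnn, Int.toNat_natCast]
  rw [Nat.toDigits, pvCoreSum (m + 1) m [] (by omega),
    pvLoopSum (m + 1) m 0 (by omega)]
  simp

theorem soma_fatorial_eq (n : Int) : soma_fatorial n = soma_fatorial_alt n := by
  unfold soma_fatorial soma_fatorial_alt
  set fat := (PySem.List.pyRange 1 (n + 1) 1).foldl (fun fat i => fat * i) 1 with hfatdef
  have hfat : 0 < fat := by
    apply pvFoldlMulPos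
    · intro i hi
      have := PySem.List.mem_pyRange_one.mp hi
      omega
    · norm_num
  set fatL := (PySem.Int.toStr fat).toList with hL
  rw [PySem.List.foldl_pyRange_zero_pyGetD' fatL ' '
    (fun soma c => soma + (PySem.Int.ofChars? [c]).getD 0) 0]
  rw [pvFoldlAdd (fun c => (PySem.Int.ofChars? [c]).getD 0) fatL 0, hL,
    pvStrSumEqLoop fat (le_of_lt hfat)]
  ring_nf

-- ===== VERDICT (by name: the statement is the Claim_ definition above) =====
theorem soma_fatorial_spec : Claim_equal_soma_fatorial := by
  intro n _
  unfold Spec_soma_fatorial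
  exact soma_fatorial_eq n
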